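-- pv_equiv track=rewrite | github.com/sgriffin53/shortcut_suggest | gutenberg.py | is_name_format
-- ===== SOURCE A (Python) =====
-- def is_name_format(word):
--     if len(word) == 0: return False
--     if not word[0].isupper(): return False
--     for char in word:
--         allow = False
--         if char >= 'A' and char <= 'Z':
--             allow = True
--         elif char >= 'a' and char <= 'z':
--             allow = True
--         if not allow: return False
--     if word.replace(word[0],'').islower(): return True
--     return False
-- ===== SOURCE B (Python) =====
-- def is_name_format(word):
--     return (len(word) >= 2
--             and 'A' <= word[0] <= 'Z'
--             and all('a' <= c <= 'z' for c in word[1:]))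
-- ===== Notes on version B (the rewrite author's own statement) =====
-- stated objective: simpler
-- what changed: B is a single boolean expression (first char uppercase, all remaining chars lowercase) instead of A's per-char allow-flag loop followed by a replace(word[0],'')+islower pass over a rebuilt string.
-- intended difference: On words whose uppercase first letter recurs later while every other character is lowercase (e.g. 'AbA'), A returns True because replace(word[0],'') strips every later copy of the first letter; B returns False, the intended capitalized-name shape (first letter uppercase, all the rest lowercase). — e.g. on is_name_format("AbA"): A returns true, B returns false
import Mathlib
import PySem

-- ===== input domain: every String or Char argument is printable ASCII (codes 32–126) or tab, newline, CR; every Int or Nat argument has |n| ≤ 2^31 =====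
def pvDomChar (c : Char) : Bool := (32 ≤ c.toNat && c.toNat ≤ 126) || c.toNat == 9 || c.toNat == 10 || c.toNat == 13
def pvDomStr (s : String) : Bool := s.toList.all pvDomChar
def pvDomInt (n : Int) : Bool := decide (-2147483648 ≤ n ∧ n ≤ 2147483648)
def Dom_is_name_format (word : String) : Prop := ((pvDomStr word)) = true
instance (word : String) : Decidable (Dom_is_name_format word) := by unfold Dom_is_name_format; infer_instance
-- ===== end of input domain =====

-- B: one boolean expression "first char uppercase, rest lowercase" instead of A's
-- allow-flag loop plus replace(word[0],'')+islower pass; B differs from A exactly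
-- on the D_ inputs below.

-- ===== PORT A =====
-- A's per-char loop with its 'allow' flag
def pvLoopA : List Char → Bool
  | [] => true
  | c :: t =>
    let allow := if 'A' ≤ c ∧ c ≤ 'Z' then true
                 else if 'a' ≤ c ∧ c ≤ 'z' then true
                 else false
    if !allow then false else pvLoopA t

-- hand port of str.islower (no PySem primitive): at least one lowercase cased char, no uppercase one — exact on the ASCII domain
def pvIslower (cs : List Char) : Bool :=
  cs.any PySem.Chars.islower && cs.all (fun c => !PySem.Chars.isupper c)

def pvNameA (cs : List Char) : Bool :=
  match cs with
  | [] => false                                  -- len(word) == 0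
  | c0 :: t =>
    if !PySem.Chars.isupper c0 then false        -- not word[0].isupper()
    else if !pvLoopA (c0 :: t) then false        -- the for-char loop
    else if pvIslower (PySem.Chars.replace (c0 :: t) [c0] []) then true
    else false

def is_name_format (word : String) : Bool := pvNameA word.toList

-- ===== PORT B =====
-- len(word) >= 2 and 'A' <= word[0] <= 'Z' and all('a' <= c <= 'z' for c in word[1:])
def pvNameB (cs : List Char) : Bool :=
  match cs with
  | c0 :: c1 :: t =>
    ('A' ≤ c0 && c0 ≤ 'Z') && (c1 :: t).all (fun c => 'a' ≤ c && c ≤ 'z')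
  | _ => false

def is_name_format_alt (word : String) : Bool := pvNameB word.toList

-- ===== PRECONDITION & SPEC =====
-- On words whose uppercase first letter recurs later while every other character is
-- lowercase (e.g. "AbA"), A returns True because replace(word[0],'') strips every later
-- copy of the first letter; B returns False, the intended capitalized-name shape.
def D_is_name_format (word : String) : Prop :=
  word.toList ≠ [] ∧
  ('A' ≤ word.toList.headD ' ' ∧ word.toList.headD ' ' ≤ 'Z') ∧
  word.toList.headD ' ' ∈ word.toList.tail ∧
  (word.toList.tail.all (fun c => c == word.toList.headD ' ' || ('a' ≤ c && c ≤ 'z')) = true) ∧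
  (word.toList.tail.any (fun c => 'a' ≤ c && c ≤ 'z') = true)
instance (word : String) : Decidable (D_is_name_format word) := by
  unfold D_is_name_format; infer_instance

def Spec_is_name_format (word : String) (out : Bool) : Prop :=
  ¬ D_is_name_format word → out = is_name_format_alt word
instance (word : String) (out : Bool) : Decidable (Spec_is_name_format word out) := by
  unfold Spec_is_name_format; infer_instance

def pvDiffWitness_is_name_format : String := "AbA"
def pvDiffWitnessOut_is_name_format : Bool × Bool := (true, false)

-- ===== CLAIM (what is proved, stated in full; the proofs are below) =====
def Claim_unchanged_is_name_format : Prop := ∀ (word : String), Dom_is_name_format word → Spec_is_name_format word (is_name_format word)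
def Claim_changed_is_name_format : Prop := Dom_is_name_format (pvDiffWitness_is_name_format) ∧ D_is_name_format (pvDiffWitness_is_name_format) ∧ is_name_format (pvDiffWitness_is_name_format) = pvDiffWitnessOut_is_name_format.1 ∧ is_name_format_alt (pvDiffWitness_is_name_format) = pvDiffWitnessOut_is_name_format.2 ∧ pvDiffWitnessOut_is_name_format.1 ≠ pvDiffWitnessOut_is_name_format.2
def Claim_exact_is_name_format : Prop := ∀ (word : String), Dom_is_name_format word → D_is_name_format word → is_name_format word ≠ is_name_format_alt word

-- ===== LEMMAS AND PROOFS =====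

-- replace cs [c0] '' is the filter removing every occurrence of c0
theorem pvReplaceGo_filter (c0 : Char) : ∀ (s acc : List Char),
    PySem.Chars.replace.go [c0] [] s.length s acc = acc.reverse ++ s.filter (fun c => !(c == c0)) := by
  intro s
  induction s with
  | nil => intro acc; simp [PySem.Chars.replace.go]
  | cons c t ih =>
    intro acc
    show PySem.Chars.replace.go [c0] [] (t.length + 1) (c :: t) acc = _
    unfold PySem.Chars.replace.go
    by_cases hc : c = c0
    · subst hc
      simp [List.isPrefixOf, ih]
    · have hpre : [c0].isPrefixOf (c :: t) = false := by
        simp [List.isPrefixOf]; exact fun h => absurd h.symm hc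
      simp [hpre, ih, hc]

theorem pvReplace_filter (c0 : Char) (cs : List Char) :
    PySem.Chars.replace cs [c0] [] = cs.filter (fun c => !(c == c0)) := by
  simpa using pvReplaceGo_filter c0 cs []

theorem pvLoopA_iff (cs : List Char) :
    pvLoopA cs = true ↔ ∀ c ∈ cs, ('A' ≤ c ∧ c ≤ 'Z') ∨ ('a' ≤ c ∧ c ≤ 'z') := by
  induction cs with
  | nil => simp [pvLoopA]
  | cons c t ih =>
    by_cases hu : 'A' ≤ c ∧ c ≤ 'Z'
    · simp [pvLoopA, hu, ih]
    · by_cases hl : 'a' ≤ c ∧ c ≤ 'z'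
      · simp [pvLoopA, hu, hl, ih]
      · simp [pvLoopA, hu, hl]

-- lowercase and uppercase ASCII ranges are disjoint
theorem pvLowNeUp {c c0 : Char} (hl : 'a' ≤ c ∧ c ≤ 'z') (hu : 'A' ≤ c0 ∧ c0 ≤ 'Z') : c ≠ c0 := by
  intro h; subst h
  exact absurd (le_trans hl.1 hu.2) (by decide)

theorem pvLow_islower {c : Char} (hl : 'a' ≤ c ∧ c ≤ 'z') : PySem.Chars.islower c = true := by
  simp [PySem.Chars.islower, hl.1, hl.2]

theorem pvLow_not_isupper {c : Char} (hl : 'a' ≤ c ∧ c ≤ 'z') : PySem.Chars.isupper c = false := by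
  have : ¬ c ≤ 'Z' := fun h => absurd (le_trans hl.1 h) (by decide)
  simp [PySem.Chars.isupper, this]

theorem pvUp_isupper {c : Char} (hu : 'A' ≤ c ∧ c ≤ 'Z') : PySem.Chars.isupper c = true := by
  simp [PySem.Chars.isupper, hu.1, hu.2]

-- A's value on a word starting with an uppercase letter, in terms of the tail
theorem pvA_char (c0 : Char) (t : List Char) (hu : 'A' ≤ c0 ∧ c0 ≤ 'Z') :
    (pvNameA (c0 :: t) = true) ↔
      (pvLoopA t = true ∧ pvIslower (t.filter (fun c => !(c == c0))) = true) := by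
  unfold pvNameA
  dsimp only
  rw [pvReplace_filter]
  have hup := pvUp_isupper hu
  have hfilter : (c0 :: t).filter (fun c => !(c == c0)) = t.filter (fun c => !(c == c0)) := by
    simp [List.filter]
  have hloop : pvLoopA (c0 :: t) = pvLoopA t := by
    simp [pvLoopA, hu]
  rw [hfilter]
  simp only [hup, hloop, Bool.not_true, Bool.false_eq_true, if_false]
  cases h : pvLoopA t <;> simp_all

-- B's value on a word starting with an uppercase letter
theorem pvB_char (c0 : Char) (t : List Char) (hu : 'A' ≤ c0 ∧ c0 ≤ 'Z') :
    (pvNameB (c0 :: t) = true) ↔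
      (t ≠ [] ∧ ∀ c ∈ t, 'a' ≤ c ∧ c ≤ 'z') := by
  unfold pvNameB
  cases t with
  | nil => simp
  | cons c1 t' => simp [hu.1, hu.2, List.all_eq_true, and_assoc]

-- list-level core: A = B on any character list outside the (list form of the) change region
theorem pvMain (cs : List Char)
    (hnD : ¬ (cs ≠ [] ∧ ('A' ≤ cs.headD ' ' ∧ cs.headD ' ' ≤ 'Z') ∧ cs.headD ' ' ∈ cs.tail ∧
        (∀ c ∈ cs.tail, c = cs.headD ' ' ∨ ('a' ≤ c ∧ c ≤ 'z')) ∧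
        (∃ c ∈ cs.tail, 'a' ≤ c ∧ c ≤ 'z'))) :
    pvNameA cs = pvNameB cs := by
  cases cs with
  | nil => rfl
  | cons c0 t =>
    by_cases hu : 'A' ≤ c0 ∧ c0 ≤ 'Z'
    · rw [Bool.eq_iff_iff, pvA_char c0 t hu, pvB_char c0 t hu]
      have hDfalse : ¬ (c0 ∈ t ∧ (∀ c ∈ t, c = c0 ∨ ('a' ≤ c ∧ c ≤ 'z')) ∧ ∃ c ∈ t, 'a' ≤ c ∧ c ≤ 'z') := by
        intro ⟨h1, h2, h3⟩
        exact hnD ⟨by simp, by simpa using hu, by simpa using h1, by simpa using h2, by simpa using h3⟩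
      constructor
      · rintro ⟨hloop, hlow⟩
        unfold pvIslower at hlow
        rw [Bool.and_eq_true, List.any_eq_true, List.all_eq_true] at hlow
        obtain ⟨⟨d, hd, hdl⟩, hall⟩ := hlow
        rw [List.mem_filter] at hd
        obtain ⟨hdt, hdne⟩ := hd
        have hdlow : 'a' ≤ d ∧ d ≤ 'z' := by
          rcases (pvLoopA_iff t).1 hloop d hdt with h | h
          · exact absurd (pvUp_isupper h) (by simpa using hall d (List.mem_filter.2 ⟨hdt, hdne⟩))
          · exact h
        refine ⟨by rintro rfl; simp at hdt, ?_⟩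
        intro c hct
        by_cases hc0 : c = c0
        · -- c0 occurs in the tail: D would hold, contradiction
          exfalso
          apply hDfalse
          refine ⟨hc0 ▸ hct, ?_, ⟨d, hdt, hdlow⟩⟩
          intro e het
          by_cases he : e = c0
          · exact Or.inl he
          · right
            have hem : e ∈ t.filter (fun c => !(c == c0)) := List.mem_filter.2 ⟨het, by simp [he]⟩
            rcases (pvLoopA_iff t).1 hloop e het with h | h
            · exact absurd (pvUp_isupper h) (by simpa using hall e hem)
            · exact h
        · have hcm : c ∈ t.filter (fun c => !(c == c0)) := List.mem_filter.2 ⟨hct, by simp [hc0]⟩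
          rcases (pvLoopA_iff t).1 hloop c hct with h | h
          · exact absurd (pvUp_isupper h) (by simpa using hall c hcm)
          · exact h
      · rintro ⟨hne, hlow⟩
        have hfil : t.filter (fun c => !(c == c0)) = t := by
          apply List.filter_eq_self.2
          intro c hct
          simpa using pvLowNeUp (hlow c hct) hu
        refine ⟨(pvLoopA_iff t).2 (fun c hc => Or.inr (hlow c hc)), ?_⟩
        unfold pvIslower
        rw [hfil, Bool.and_eq_true, List.any_eq_true, List.all_eq_true]
        obtain ⟨d, hd⟩ := List.exists_mem_of_ne_nil t hne
        exact ⟨⟨d, hd, pvLow_islower (hlow d hd)⟩,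
          fun c hc => by simp [pvLow_not_isupper (hlow c hc)]⟩
    · -- first char not uppercase: both false
      have hup : PySem.Chars.isupper c0 = false := by
        simp only [PySem.Chars.isupper, Bool.and_eq_false_iff, decide_eq_false_iff_not]
        by_cases h1 : 'A' ≤ c0
        · exact Or.inr (fun h2 => hu ⟨h1, h2⟩)
        · exact Or.inl h1
      have hA : pvNameA (c0 :: t) = false := by
        unfold pvNameA; simp [hup]
      have hB : pvNameB (c0 :: t) = false := by
        cases t with
        | nil => rfl
        | cons c1 t' =>
          unfold pvNameB
          dsimp only
          rw [Bool.and_eq_false_iff]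
          left
          rw [Bool.and_eq_false_iff]
          by_cases h1 : 'A' ≤ c0
          · exact Or.inr (by simpa using fun h2 => hu ⟨h1, h2⟩)
          · exact Or.inl (by simpa using h1)
      rw [hA, hB]

-- ===== VERDICT (by name: the statements are the Claim_ definitions above) =====
theorem is_name_format_spec : Claim_unchanged_is_name_format := by
  intro word _ hnD
  unfold D_is_name_format at hnD
  show pvNameA word.toList = pvNameB word.toList
  apply pvMain
  rintro ⟨h1, h2, h3, h4, h5⟩
  apply hnD
  refine ⟨h1, h2, h3, ?_, ?_⟩
  · rw [List.all_eq_true]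
    intro c hc
    rcases h4 c hc with h | h
    · simp [h]
    · simp [h.1, h.2]
  · rw [List.any_eq_true]
    obtain ⟨c, hc, hl⟩ := h5
    exact ⟨c, hc, by simp [hl.1, hl.2]⟩

theorem is_name_format_changed : Claim_changed_is_name_format := by
  unfold Claim_changed_is_name_format; decide

theorem is_name_format_tight : Claim_exact_is_name_format := by
  intro word _ hD
  obtain ⟨hne, hu', hmem, hall, hex⟩ := hD
  show pvNameA word.toList ≠ pvNameB word.toList
  cases hw : word.toList with
  | nil => exact absurd hw hne
  | cons c0 t =>
    rw [hw] at hu' hmem hall hex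
    have hu : 'A' ≤ c0 ∧ c0 ≤ 'Z' := by simpa using hu'
    have hmem' : c0 ∈ t := by simpa using hmem
    have hall' : ∀ c ∈ t, c = c0 ∨ ('a' ≤ c ∧ c ≤ 'z') := by
      rw [List.all_eq_true] at hall
      intro c hc
      simpa using hall c hc
    obtain ⟨d, hdt, hdl⟩ : ∃ c ∈ t, 'a' ≤ c ∧ c ≤ 'z' := by
      rw [List.any_eq_true] at hex
      obtain ⟨c, hc, h⟩ := hex
      exact ⟨c, hc, by simpa using h⟩
    have hA : pvNameA (c0 :: t) = true := by
      rw [pvA_char c0 t hu]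
      refine ⟨(pvLoopA_iff t).2 (fun c hc => (hall' c hc).elim (fun h => h ▸ Or.inl hu) Or.inr), ?_⟩
      unfold pvIslower
      rw [Bool.and_eq_true, List.any_eq_true, List.all_eq_true]
      refine ⟨⟨d, List.mem_filter.2 ⟨hdt, by simp [pvLowNeUp hdl hu]⟩, pvLow_islower hdl⟩, ?_⟩
      intro c hc
      rw [List.mem_filter] at hc
      rcases hall' c hc.1 with h | h
      · exact absurd h (by simpa using hc.2)
      · simp [pvLow_not_isupper h]
    have hB : pvNameB (c0 :: t) = false := by
      rw [← Bool.not_eq_true, pvB_char c0 t hu]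
      rintro ⟨-, hlow⟩
      exact pvLowNeUp (hlow c0 hmem') hu rfl
    rw [hA, hB]; decide
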